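-- pv_equiv track=rewrite | github.com/jenny-jione/baekjoon | 2004.py | get_five_k
-- ===== SOURCE A (Python) =====
-- def get_five_k(n):
--     if n < 5:
--         return 0
--     k = 1
--     while True:
--         if 5**k <= n < 5**(k+1):
--             break
--         k += 1
--     return k
-- ===== SOURCE B (Python) =====
-- def get_five_k(n):
--     if n < 5:
--         return 0
--     return 1 + get_five_k(n // 5)
-- ===== Notes on version B (the rewrite author's own statement) =====
-- stated objective: simpler
-- what changed: B recursively divides n by 5 (k = 1 + get_five_k(n//5)) instead of A's upward linear search that recomputes 5**k and 5**(k+1) each pass of a while-True loop.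
import Mathlib
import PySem

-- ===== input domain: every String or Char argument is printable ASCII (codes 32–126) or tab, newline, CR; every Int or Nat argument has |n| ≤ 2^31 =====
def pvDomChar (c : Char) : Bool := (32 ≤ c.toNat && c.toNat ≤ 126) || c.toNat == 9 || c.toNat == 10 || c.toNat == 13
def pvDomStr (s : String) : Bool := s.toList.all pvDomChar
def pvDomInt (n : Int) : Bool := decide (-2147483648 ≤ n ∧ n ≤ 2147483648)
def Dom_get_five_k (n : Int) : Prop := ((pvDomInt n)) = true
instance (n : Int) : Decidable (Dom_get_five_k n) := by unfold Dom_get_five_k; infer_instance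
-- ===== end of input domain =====

-- B computes the answer by recursive floor-division of n by 5 instead of A's upward
-- linear search recomputing 5**k and 5**(k+1) each pass; same return value.

-- ===== PORT A =====
-- A's unbounded `while True` loop; the fuel (100) only makes the recursion total and is
-- never reached on Dom (it would need n ≥ 5^101).
def getFiveKLoop (n : Int) (fuel k : Nat) : Int :=
  match fuel with
  | 0 => (k : Int)
  | f + 1 =>
    if (5 : Int) ^ k ≤ n ∧ n < (5 : Int) ^ (k + 1) then (k : Int)
    else getFiveKLoop n f (k + 1)

def get_five_k (n : Int) : Int :=
  if n < 5 then 0 else getFiveKLoop n 100 1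

-- ===== PORT B =====
-- B's recursion: 0 if n < 5, else 1 + get_five_k(n // 5).
def get_five_k_alt (n : Int) : Int :=
  if h : n < 5 then 0 else 1 + get_five_k_alt (PySem.Int.floordiv n 5)
termination_by n.toNat
decreasing_by
  rw [PySem.Int.floordiv_eq_ediv_of_pos (by omega : (0:Int) < 5)]
  omega

-- ===== PRECONDITION & SPEC =====
def Spec_get_five_k (n : Int) (out : Int) : Prop := out = get_five_k_alt n
instance (n : Int) (out : Int) : Decidable (Spec_get_five_k n out) := by unfold Spec_get_five_k; infer_instance

-- ===== CLAIM (what is proved, stated in full; the proofs are below) =====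
def Claim_equal_get_five_k : Prop := ∀ (n : Int), Dom_get_five_k n → Spec_get_five_k n (get_five_k n)

-- ===== LEMMAS AND PROOFS =====

theorem alt_base (n : Int) (h : n < 5) : get_five_k_alt n = 0 := by
  rw [get_five_k_alt]; simp [h]

-- B's result m satisfies 5^m ≤ n < 5^(m+1) (for n ≥ 5, with m ≥ 1).
theorem alt_spec : ∀ (n : Int), 5 ≤ n →
    ∃ m : Nat, 1 ≤ m ∧ get_five_k_alt n = (m : Int) ∧ (5 : Int) ^ m ≤ n ∧ n < (5 : Int) ^ (m + 1) := by
  intro n h5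
  induction hn : n.toNat using Nat.strong_induction_on generalizing n with
  | _ t ih => ?_
  rw [get_five_k_alt, dif_neg (by omega)]
  rw [PySem.Int.floordiv_eq_ediv_of_pos (by omega : (0:Int) < 5)]
  by_cases hq : n / 5 < 5
  · refine ⟨1, le_refl _, ?_, ?_, ?_⟩
    · rw [alt_base _ hq]; norm_num
    · norm_num; omega
    · norm_num; omega
  · obtain ⟨m, hm1, hmeq, hml, hmu⟩ := ih (n / 5).toNat (by omega) (n / 5) (by omega) rfl
    refine ⟨m + 1, by omega, ?_, ?_, ?_⟩
    · rw [hmeq]; push_cast; ring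
    · have : (5 : Int) ^ (m + 1) = 5 ^ m * 5 := by ring
      rw [this]; omega
    · have : (5 : Int) ^ (m + 1 + 1) = 5 ^ (m + 1) * 5 := by ring
      rw [this]
      have : (5 : Int) ^ (m + 1) = 5 ^ m * 5 := by ring
      omega

-- A's loop returns m whenever 5^m ≤ n < 5^(m+1), k ≤ m, and fuel suffices.
theorem loopA (n : Int) : ∀ (fuel k m : Nat), k ≤ m → m < k + fuel →
    (5 : Int) ^ m ≤ n → n < (5 : Int) ^ (m + 1) → getFiveKLoop n fuel k = (m : Int) := by
  intro fuel
  induction fuel with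
  | zero => intro k m h1 h2 _ _; omega
  | succ f ih =>
    intro k m h1 h2 hl hu
    simp only [getFiveKLoop]
    by_cases hk : k = m
    · subst hk; rw [if_pos ⟨hl, hu⟩]
    · have hkm : k + 1 ≤ m := by omega
      rw [if_neg ?_]
      · exact ih (k + 1) m hkm (by omega) hl hu
      · rintro ⟨_, hb⟩
        have : (5 : Int) ^ (k + 1) ≤ 5 ^ m :=
          pow_le_pow_right₀ (by norm_num) hkm
        omega

-- ===== VERDICT (by name: the statement is the Claim_ definition above) =====
theorem get_five_k_spec : Claim_equal_get_five_k := by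
  intro n hdom
  unfold Spec_get_five_k get_five_k
  by_cases h5 : n < 5
  · rw [if_pos h5, alt_base n h5]
  · rw [if_neg h5]
    obtain ⟨m, hm1, hmeq, hml, hmu⟩ := alt_spec n (by omega)
    have hbound : n ≤ 2147483648 := by
      unfold Dom_get_five_k pvDomInt at hdom
      simp only [decide_eq_true_eq] at hdom
      omega
    have hm13 : m ≤ 13 := by
      by_contra hgt
      have h14 : (5 : Int) ^ 14 ≤ 5 ^ m :=
        pow_le_pow_right₀ (by norm_num) (by omega)
      have : (5 : Int) ^ 14 = 6103515625 := by norm_num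
      omega
    rw [hmeq]
    exact loopA n 100 1 m hm1 (by omega) hml hmu
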